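-- pv_equiv track=rewrite | github.com/AquaBx/advent-of-code | day/code.py | sum_prio
-- ===== SOURCE A (Python) =====
-- def sum_prio(liste):
--     sum=0
--     for c in liste:
--         car = c[0]
--         if ord("A") <= ord(car) <= ord("Z"):
--             sum+= ord(car)-ord("A")+27
--         elif ord("a") <= ord(car) <= ord("z"):
--             sum += ord(car)-ord("a")+1
--     return sum
-- ===== SOURCE B (Python) =====
-- def sum_prio(liste):
--     letters = "abcdefghijklmnopqrstuvwxyzABCDEFGHIJKLMNOPQRSTUVWXYZ"
--     prio = {ch: i + 1 for i, ch in enumerate(letters)}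
--     return sum(prio.get(c[0], 0) for c in liste)
-- ===== Notes on version B (the rewrite author's own statement) =====
-- stated objective: faster
-- what changed: Replaces A's per-character ord-range branch arithmetic with a priority table (dict ch -> 1..52) built once before a single summing pass with .get(c, 0).
import Mathlib
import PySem

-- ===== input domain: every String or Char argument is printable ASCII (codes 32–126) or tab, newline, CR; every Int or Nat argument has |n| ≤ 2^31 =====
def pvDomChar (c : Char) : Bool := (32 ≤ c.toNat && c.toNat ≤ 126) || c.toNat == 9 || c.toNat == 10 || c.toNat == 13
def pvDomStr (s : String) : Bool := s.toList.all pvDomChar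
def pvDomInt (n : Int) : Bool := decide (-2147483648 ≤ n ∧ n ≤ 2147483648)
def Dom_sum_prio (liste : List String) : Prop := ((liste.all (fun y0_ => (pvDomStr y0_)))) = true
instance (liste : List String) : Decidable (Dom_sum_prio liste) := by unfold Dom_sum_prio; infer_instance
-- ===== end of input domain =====

-- B builds a letter->priority table once, then sums one lookup per element; objective: idiomatic.
-- Pre_ excludes lists containing an empty string, on which A raises IndexError at c[0].

-- ===== PORT A =====
def sum_prio (liste : List String) : Int :=
  liste.foldl (fun sum c =>
    match PySem.Str.pyGet? c 0 with
    | none => sum  -- c[0] raises IndexError in Python; excluded by Pre_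
    | some car =>
      if 65 ≤ car.toNat ∧ car.toNat ≤ 90 then sum + ((car.toNat : Int) - 65 + 27)
      else if 97 ≤ car.toNat ∧ car.toNat ≤ 122 then sum + ((car.toNat : Int) - 97 + 1)
      else sum) 0

-- ===== PORT B =====
def pvLetters : String := "abcdefghijklmnopqrstuvwxyzABCDEFGHIJKLMNOPQRSTUVWXYZ"

def pvPrio : PySem.Dict Char Int :=
  (PySem.List.enumerate pvLetters.toList).foldl
    (fun d p => d.insert p.2 (p.1 + 1)) PySem.Dict.empty

def sum_prio_alt (liste : List String) : Int :=
  (liste.map (fun c =>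
    match PySem.Str.pyGet? c 0 with
    | none => 0  -- c[0] raises IndexError in Python; excluded by Pre_
    | some ch => pvPrio.getD ch 0)).sum

-- ===== PRECONDITION & SPEC =====
-- Pre_ excludes lists containing an empty string: there A (and B) raise IndexError at c[0].
def Pre_sum_prio (liste : List String) : Prop := ∀ s ∈ liste, s ≠ ""
instance (liste : List String) : Decidable (Pre_sum_prio liste) := by unfold Pre_sum_prio; infer_instance
def pvWitness_sum_prio : List String := ["aZ", "q!", "9x"]
def Spec_sum_prio (liste : List String) (out : Int) : Prop := out = sum_prio_alt liste
instance (liste : List String) (out : Int) : Decidable (Spec_sum_prio liste out) := by unfold Spec_sum_prio; infer_instance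

-- ===== CLAIM (what is proved, stated in full; the proofs are below) =====
def Claim_equal_sum_prio : Prop := ∀ (liste : List String), Dom_sum_prio liste → Pre_sum_prio liste → Spec_sum_prio liste (sum_prio liste)

-- ===== LEMMAS AND PROOFS =====
def pvValA (ch : Char) : Int :=
  if 65 ≤ ch.toNat ∧ ch.toNat ≤ 90 then (ch.toNat : Int) - 65 + 27
  else if 97 ≤ ch.toNat ∧ ch.toNat ≤ 122 then (ch.toNat : Int) - 97 + 1
  else 0

set_option maxRecDepth 4000 in
theorem pvPrio_getD_fin : ∀ n : Fin 127, pvPrio.getD (Char.ofNat n.val) 0 = pvValA (Char.ofNat n.val) := by decide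

theorem pvPrio_getD (ch : Char) (h : ch.toNat ≤ 126) : pvPrio.getD ch 0 = pvValA ch := by
  have := pvPrio_getD_fin ⟨ch.toNat, Nat.lt_succ_of_le h⟩
  simpa [Char.ofNat_toNat] using this

theorem pvFoldl_eq (l : List String) (a : Int)
    (hd : (l.all (fun s => pvDomStr s)) = true) :
    l.foldl (fun sum c =>
      match PySem.Str.pyGet? c 0 with
      | none => sum
      | some car =>
        if 65 ≤ car.toNat ∧ car.toNat ≤ 90 then sum + ((car.toNat : Int) - 65 + 27)
        else if 97 ≤ car.toNat ∧ car.toNat ≤ 122 then sum + ((car.toNat : Int) - 97 + 1)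
        else sum) a
    = a + (l.map (fun c =>
        match PySem.Str.pyGet? c 0 with
        | none => 0
        | some ch => pvPrio.getD ch 0)).sum := by
  induction l generalizing a with
  | nil => simp
  | cons s t ih =>
    simp only [List.all_cons, Bool.and_eq_true] at hd
    simp only [List.foldl_cons, List.map_cons, List.sum_cons]
    rw [ih _ hd.2]
    have hstep : (match PySem.Str.pyGet? s 0 with
      | none => a
      | some car =>
        if 65 ≤ car.toNat ∧ car.toNat ≤ 90 then a + ((car.toNat : Int) - 65 + 27)
        else if 97 ≤ car.toNat ∧ car.toNat ≤ 122 then a + ((car.toNat : Int) - 97 + 1)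
        else a)
      = a + (match PySem.Str.pyGet? s 0 with
        | none => (0 : Int)
        | some ch => pvPrio.getD ch 0) := by
      rcases hg : PySem.Str.pyGet? s 0 with _ | car
      · simp
      · have hmem : car ∈ s.toList := by
          have : s.toList[(0 : Nat)]? = some car := by
            by_cases hlen : 0 < s.length
            · simpa [PySem.Str.pyGet?, PySem.List.pyGet?, PySem.List.pyIdx?, hlen] using hg
            · simp [PySem.Str.pyGet?, PySem.List.pyGet?, PySem.List.pyIdx?, hlen] at hg
          exact List.mem_of_getElem? this
        have hdc : pvDomChar car = true := by
          have := hd.1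
          simp only [pvDomStr, List.all_eq_true] at this
          exact this car hmem
        have hle : car.toNat ≤ 126 := by
          simp only [pvDomChar, Bool.or_eq_true, Bool.and_eq_true, decide_eq_true_eq,
            beq_iff_eq] at hdc
          omega
        show (if 65 ≤ car.toNat ∧ car.toNat ≤ 90 then a + ((car.toNat : Int) - 65 + 27)
          else if 97 ≤ car.toNat ∧ car.toNat ≤ 122 then a + ((car.toNat : Int) - 97 + 1)
          else a) = a + pvPrio.getD car 0
        rw [pvPrio_getD car hle]
        unfold pvValA
        split_ifs <;> ring
    rw [hstep]
    ring

theorem sum_prio_spec : Claim_equal_sum_prio := by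
  intro liste hdom hpre
  unfold Spec_sum_prio sum_prio sum_prio_alt
  rw [pvFoldl_eq liste 0 hdom]
  ring
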